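-- pv_equiv track=rewrite | github.com/AlgorithmGosu/2022-05-challenge | chapter13_DFS_BFS_Problem/18_yuje.py | dfs
-- ===== SOURCE A (Python) =====
-- def cut(w):
--     count = 0
--     for i in range(len(w)):
--         if w[i]=='(':
--             count +=1
--         else:
--             count -=1
--         if count ==0:
--             break
--     return w[:i+1],w[i+1:]
--
-- def collect(w):
--     count = 0
--     for i in range(len(w)):
--         if w[i]=='(':
--             count +=1
--         else:
--             count -=1
--         if count <0:
--             return False
--     return True
--
-- def dfs(w):
--     if w =='':
--         return w
--     u,v = cut(w)
--     if collect(u):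
--         return u + dfs(v)
--     s ='('+ dfs(v) + ')'
--     for m in u[1:len(u)-1]:
--         if m == '(':
--             s+=')'
--         else:
--             s+='('
--     return s
-- ===== SOURCE B (Python) =====
-- def dfs(w):
--     # One pass to split w into its top-level segments (cut points where the
--     # running bracket count returns to 0), remembering for each segment
--     # whether the count ever dipped below 0 inside it; then fold the segment
--     # list right-to-left into the answer.
--     segs = []
--     count = 0
--     start = 0
--     neg = False
--     for i, ch in enumerate(w):
--         count += 1 if ch == '(' else -1
--         if count < 0:
--             neg = True
--         if count == 0:
--             segs.append((w[start:i + 1], neg))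
--             start = i + 1
--             neg = False
--     if start < len(w):
--         segs.append((w[start:], neg))
--     acc = ''
--     for seg, bad in reversed(segs):
--         if not bad:
--             acc = seg + acc
--         else:
--             acc = '(' + acc + ')' + ''.join(')' if c == '(' else '(' for c in seg[1:-1])
--     return acc
-- ===== Notes on version B (the rewrite author's own statement) =====
-- stated objective: alternative
-- what changed: Replaces A's recursion on the post-cut remainder (re-scanning via cut/collect at each level) with a single segmentation pass that splits the string into its top-level zero-count segments tagged with a went-negative flag, followed by one right-to-left fold of the segment list into the answer.
import Mathlib
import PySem

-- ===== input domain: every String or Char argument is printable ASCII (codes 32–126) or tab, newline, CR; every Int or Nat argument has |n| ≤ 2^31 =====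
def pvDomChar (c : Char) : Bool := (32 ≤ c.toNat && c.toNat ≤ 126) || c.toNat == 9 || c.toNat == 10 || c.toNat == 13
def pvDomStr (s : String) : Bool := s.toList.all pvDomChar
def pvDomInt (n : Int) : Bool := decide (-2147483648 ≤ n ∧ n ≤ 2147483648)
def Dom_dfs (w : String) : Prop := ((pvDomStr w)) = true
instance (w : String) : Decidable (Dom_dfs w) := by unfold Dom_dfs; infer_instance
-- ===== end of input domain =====

-- B replaces A's recursion on the remainder with a single segmentation pass plus a
-- right-to-left fold over the segment list (objective: alternative decomposition).

-- ===== PORT A =====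
-- cut(w): scan until the running count first returns to 0 (or the string ends);
-- return (prefix through that index, rest).
def cutGo : List Char → Int → List Char × List Char
  | [], _ => ([], [])
  | c :: rest, count =>
    let count' := if c = '(' then count + 1 else count - 1
    if count' = 0 then ([c], rest)
    else
      let p := cutGo rest count'
      (c :: p.1, p.2)

-- collect(w): true iff the running count never goes negative.
def collectGo : List Char → Int → Bool
  | [], _ => true
  | c :: rest, count =>
    let count' := if c = '(' then count + 1 else count - 1
    if count' < 0 then false else collectGo rest count'

theorem cutGo_snd_le (l : List Char) (count : Int) : (cutGo l count).2.length ≤ l.length := by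
  induction l generalizing count with
  | nil => simp [cutGo]
  | cons c rest ih =>
    simp only [cutGo]
    split <;> split
    all_goals simp
    all_goals exact le_trans (ih _) (Nat.le_succ _)

theorem cutGo_snd_lt (c : Char) (rest : List Char) (count : Int) :
    (cutGo (c :: rest) count).2.length < (c :: rest).length := by
  simp only [cutGo]
  split <;> split
  all_goals simp
  all_goals exact cutGo_snd_le rest _

-- dfs, recursing on the remainder v returned by cut; the final for-loop over
-- u[1:len(u)-1] appends the flipped characters one at a time (a foldl).
def dfsL : List Char → List Char
  | [] => []
  | c :: rest =>
    let p := cutGo (c :: rest) 0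
    if collectGo p.1 0 then p.1 ++ dfsL p.2
    else
      List.foldl (fun s m => s ++ [if m = '(' then ')' else '('])
        ('(' :: dfsL p.2 ++ [')']) ((p.1.drop 1).dropLast)
  termination_by l => l.length
  decreasing_by all_goals exact cutGo_snd_lt c rest 0

def dfs (w : String) : String := String.ofList (dfsL w.toList)

-- ===== PORT B =====
-- One pass: split into top-level segments, each paired with its "went negative" flag.
def segGo : List Char → Int → List Char → Bool → List (List Char × Bool)
  | [], _, cur, neg => if cur = [] then [] else [(cur.reverse, neg)]
  | c :: rest, count, cur, neg =>
    let count' := if c = '(' then count + 1 else count - 1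
    let neg' := neg || decide (count' < 0)
    if count' = 0 then (cur.reverse ++ [c], neg') :: segGo rest 0 [] false
    else segGo rest count' (c :: cur) neg'

-- one step of the reversed fold: prepend a good segment, or wrap and flip a bad one.
def stepB (p : List Char × Bool) (acc : List Char) : List Char :=
  if p.2 = false then p.1 ++ acc
  else '(' :: acc ++ ')' :: ((p.1.drop 1).dropLast.map (fun c => if c = '(' then ')' else '('))

def dfs_alt (w : String) : String :=
  String.ofList (List.foldr stepB [] (segGo w.toList 0 [] false))

-- ===== PRECONDITION & SPEC =====
def Spec_dfs (w : String) (out : String) : Prop := out = dfs_alt w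
instance (w : String) (out : String) : Decidable (Spec_dfs w out) := by unfold Spec_dfs; infer_instance

-- ===== CLAIM (what is proved, stated in full; the proofs are below) =====
def Claim_equal_dfs : Prop := ∀ (w : String), Dom_dfs w → Spec_dfs w (dfs w)

-- ===== LEMMAS AND PROOFS =====

-- whether the running count dips below 0 up to (and excluding) the break point
def negUntil : List Char → Int → Bool
  | [], _ => false
  | c :: rest, count =>
    let count' := if c = '(' then count + 1 else count - 1
    if count' = 0 then false else (decide (count' < 0) || negUntil rest count')

theorem collectGo_cutGo (l : List Char) (count : Int) :
    collectGo (cutGo l count).1 count = !negUntil l count := by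
  induction l generalizing count with
  | nil => simp [cutGo, collectGo, negUntil]
  | cons c rest ih =>
    simp only [cutGo, negUntil]
    by_cases h0 : (if c = '(' then count + 1 else count - 1) = 0
    · simp [h0, collectGo]
    · simp only [if_neg h0, collectGo]
      by_cases hn : (if c = '(' then count + 1 else count - 1) < 0
      · simp [hn]
      · simp [hn, ih]

theorem segGo_cons (l : List Char) (count : Int) (cur : List Char) (neg : Bool) (hl : l ≠ []) :
    segGo l count cur neg =
      (cur.reverse ++ (cutGo l count).1, neg || negUntil l count) ::
        segGo (cutGo l count).2 0 [] false := by
  induction l generalizing count cur neg with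
  | nil => exact absurd rfl hl
  | cons c rest ih =>
    simp only [segGo, cutGo, negUntil]
    by_cases h0 : (if c = '(' then count + 1 else count - 1) = 0
    · simp [h0]
    · simp only [if_neg h0]
      cases rest with
      | nil =>
        simp [segGo, cutGo, negUntil]
      | cons d ds =>
        rw [ih _ _ _ (by simp)]
        simp [Bool.or_assoc]

theorem foldl_append_flip (l : List Char) (s : List Char) :
    List.foldl (fun s m => s ++ [if m = '(' then ')' else '(']) s l =
      s ++ l.map (fun c => if c = '(' then ')' else '(') := by
  induction l generalizing s with
  | nil => simp
  | cons c rest ih => simp [ih]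

theorem dfsL_eq_fold (l : List Char) :
    dfsL l = List.foldr stepB [] (segGo l 0 [] false) := by
  cases l with
  | nil => simp [dfsL, segGo]
  | cons c rest =>
    have ih := dfsL_eq_fold (cutGo (c :: rest) 0).2
    rw [segGo_cons (c :: rest) 0 [] false (by simp), List.foldr_cons, ← ih]
    have hcol := collectGo_cutGo (c :: rest) 0
    rw [dfsL]
    by_cases h : negUntil (c :: rest) 0
    · have hf : collectGo (cutGo (c :: rest) 0).1 0 = false := by rw [hcol, h]; rfl
      simp only [hf, Bool.false_eq_true, if_false]
      rw [foldl_append_flip]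
      simp [stepB, h]
    · have hb : negUntil (c :: rest) 0 = false := by simpa using h
      have ht : collectGo (cutGo (c :: rest) 0).1 0 = true := by rw [hcol, hb]; rfl
      simp [ht, stepB, hb]
  termination_by l.length
  decreasing_by exact cutGo_snd_lt c rest 0

-- ===== VERDICT (by name: the statement is the Claim_ definition above) =====
theorem dfs_spec : Claim_equal_dfs := by
  intro w _
  unfold Spec_dfs dfs dfs_alt
  rw [dfsL_eq_fold]
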